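-- pv_equiv track=rewrite | github.com/bsdphk/PyReveng3 | pyreveng/instree.py | parse_match
-- ===== SOURCE A (Python) =====
-- def parse_match(fmt):
--     x = fmt.split()
--     if len(x) == 1 and len(x[0]) > 1:
--         x = x[0]
--         if x.upper() != x:
--             a = -2
--         else:
--             a = -1
--             try:
--                 a = int(x, 16)
--             except ValueError:
--                 pass
--         if a >= 0:
--             return (
--                 4 * len(x),
--                 (1 << (4 * len(x))) - 1,
--                 a)
--     mask = 0
--     bits = 0
--     width = 0
--     fl = len(fmt)
--     if fl & 1 == 0:
--         return None, None, None
--     i = 0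
--     while i < fl:
--         mask <<= 1
--         bits <<= 1
--         width += 1
--         if fmt[i] == "0":
--             mask |= 1
--         elif fmt[i] == "1":
--             mask |= 1
--             bits |= 1
--         elif fmt[i] == "?":
--             pass
--         else:
--             return (fl+1)//2, None, None
--         i += 1
--         if i < fl and fmt[i] != " ":
--             return (fl+1)//2, None, None
--         i += 1
--     return (width, mask, bits)
-- ===== SOURCE B (Python) =====
-- def parse_match(fmt):
--     x = fmt.split()
--     if len(x) == 1 and len(x[0]) > 1:
--         x = x[0]
--         if x.upper() != x:
--             a = -2
--         else:
--             a = -1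
--             try:
--                 a = int(x, 16)
--             except ValueError:
--                 pass
--         if a >= 0:
--             return (
--                 4 * len(x),
--                 (1 << (4 * len(x))) - 1,
--                 a)
--     fl = len(fmt)
--     if fl & 1 == 0:
--         return None, None, None
--     width = (fl + 1) // 2
--     if any(c != " " for c in fmt[1::2]):
--         return width, None, None
--     mask = 0
--     bits = 0
--     for c in fmt[0::2]:
--         mask <<= 1
--         bits <<= 1
--         if c == "0":
--             mask |= 1
--         elif c == "1":
--             mask |= 1
--             bits |= 1
--         elif c != "?":
--             return width, None, None
--     return width, mask, bits
-- ===== Notes on version B (the rewrite author's own statement) =====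
-- stated objective: alternative
-- what changed: Replaces A's single interleaved index walk (bit char, then separator check, two increments per iteration) by de-interleaving the string into even-position bit chars and odd-position separators with slices, validating all separators in one pass, then folding mask/bits over the bit chars with the width computed up front; all error paths return the same sentinel, so the reordering is exact.
import Mathlib
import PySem

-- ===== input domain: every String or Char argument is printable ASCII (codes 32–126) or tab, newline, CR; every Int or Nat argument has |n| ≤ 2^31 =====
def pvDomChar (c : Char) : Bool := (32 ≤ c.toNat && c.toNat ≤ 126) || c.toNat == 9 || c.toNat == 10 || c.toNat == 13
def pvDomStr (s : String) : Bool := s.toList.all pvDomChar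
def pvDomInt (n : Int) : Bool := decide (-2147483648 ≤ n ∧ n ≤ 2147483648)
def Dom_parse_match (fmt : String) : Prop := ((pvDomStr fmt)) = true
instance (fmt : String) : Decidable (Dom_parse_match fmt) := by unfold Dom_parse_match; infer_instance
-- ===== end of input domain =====

-- B de-interleaves the format into bit chars and separators and validates them in two
-- separate passes, instead of A's single interleaved index walk (objective: alternative).

-- ===== PORT A =====

-- The leading single-token hex branch, textually identical in A and B (both Pythons
-- begin with the same lines), hence a shared helper; `none` = fall through to the loop.
def pvHexTry (cs : List Char) : Option (Option Int × Option Int × Option Int) :=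
  let x := PySem.Chars.split₀ cs
  if x.length = 1 ∧ (x.headD []).length > 1 then
    -- x[0] is accessed only under len(x) == 1, so headD's default is never used
    let t := x.headD []
    let a : Int :=
      if PySem.Chars.upper t ≠ t then -2
      else match PySem.Int.ofCharsBase? t 16 with  -- int(x, 16); ValueError → keep a = -1
        | some v => v
        | none => -1
    if a ≥ 0 then
      some (some (4 * (t.length : Int)),
            some (((1 : Int) <<< (4 * t.length)) - 1),
            some a)
    else none
  else none

-- A's while loop, as the obvious structural recursion on the unread suffix of fmt:
-- fmt[i] is the head of the suffix, and the separator step `i += 1; if i < fl and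
-- fmt[i] != " "; i += 1` is pvSepA on the remaining suffix (empty exactly when i = fl).
-- fl is the total length, used only by the sentinel (fl+1)//2.
mutual
def pvLoopA (fl : Nat) (s : List Char) (m b w : Int) : Option Int × Option Int × Option Int :=
  match s with
  | [] => (some w, some m, some b)                 -- i = fl: loop ends, return (width, mask, bits)
  | c :: rest =>
    let m1 := m <<< 1
    let b1 := b <<< 1
    let w1 := w + 1
    if c = '0' then pvSepA fl rest (PySem.Int.bor m1 1) b1 w1
    else if c = '1' then pvSepA fl rest (PySem.Int.bor m1 1) (PySem.Int.bor b1 1) w1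
    else if c = '?' then pvSepA fl rest m1 b1 w1
    else (some (((fl + 1) / 2 : Nat) : Int), none, none)
  termination_by s.length

def pvSepA (fl : Nat) (s : List Char) (m b w : Int) : Option Int × Option Int × Option Int :=
  match s with
  | [] => (some w, some m, some b)                 -- i = fl: no separator check, loop ends
  | c :: rest =>
    if c ≠ ' ' then (some (((fl + 1) / 2 : Nat) : Int), none, none)
    else pvLoopA fl rest m b w
  termination_by s.length
end

def parse_match (fmt : String) : Option Int × Option Int × Option Int :=
  let cs := fmt.toList
  match pvHexTry cs with
  | some r => r
  | none =>
    let fl := cs.length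
    if fl &&& 1 = 0 then (none, none, none)
    else pvLoopA fl cs 0 0 0

-- ===== PORT B =====

-- fmt[0::2]: the even-position characters (a full-list slice with step 2).
def pvAltEven : List Char → List Char
  | [] => []
  | [c] => [c]
  | c :: _ :: rest => c :: pvAltEven rest

-- fmt[1::2]: the odd-position characters.
def pvAltOdd : List Char → List Char
  | [] => []
  | [_] => []
  | _ :: s :: rest => s :: pvAltOdd rest

-- B's fold over the bit characters; `none` = early `return width, None, None`.
def pvLoopB (s : List Char) (m b : Int) : Option (Int × Int) :=
  match s with
  | [] => some (m, b)
  | c :: rest =>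
    let m1 := m <<< 1
    let b1 := b <<< 1
    if c = '0' then pvLoopB rest (PySem.Int.bor m1 1) b1
    else if c = '1' then pvLoopB rest (PySem.Int.bor m1 1) (PySem.Int.bor b1 1)
    else if c = '?' then pvLoopB rest m1 b1
    else none

def parse_match_alt (fmt : String) : Option Int × Option Int × Option Int :=
  let cs := fmt.toList
  match pvHexTry cs with
  | some r => r
  | none =>
    let fl := cs.length
    if fl &&& 1 = 0 then (none, none, none)
    else
      let width : Int := ((fl + 1) / 2 : Nat)
      if ¬ ((pvAltOdd cs).all (fun c => c == ' ')) then (some width, none, none)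
      else
        match pvLoopB (pvAltEven cs) 0 0 with
        | some p => (some width, some p.1, some p.2)
        | none => (some width, none, none)

-- ===== PRECONDITION & SPEC =====
def Spec_parse_match (fmt : String) (out : Option Int × Option Int × Option Int) : Prop := out = parse_match_alt fmt
instance (fmt : String) (out : Option Int × Option Int × Option Int) : Decidable (Spec_parse_match fmt out) := by unfold Spec_parse_match; infer_instance

-- ===== CLAIM (what is proved, stated in full; the proofs are below) =====
def Claim_equal_parse_match : Prop := ∀ (fmt : String), Dom_parse_match fmt → Spec_parse_match fmt (parse_match fmt)

-- ===== LEMMAS AND PROOFS =====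

-- How B's two-pass tail consumes a result of pvLoopB (proof-side abbreviation).
def pvFinish (fl : Nat) (w : Int) (len : Nat) (r : Option (Int × Int)) :
    Option Int × Option Int × Option Int :=
  match r with
  | some p => (some (w + ((len + 1) / 2 : Nat)), some p.1, some p.2)
  | none => (some (((fl + 1) / 2 : Nat) : Int), none, none)

lemma pvFinish_congr (fl : Nat) (w1 w2 : Int) (len1 len2 : Nat) (r : Option (Int × Int))
    (h : w1 + ((len1 + 1) / 2 : Nat) = w2 + ((len2 + 1) / 2 : Nat)) :
    pvFinish fl w1 len1 r = pvFinish fl w2 len2 r := by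
  cases r with
  | none => rfl
  | some p => simp only [pvFinish]; rw [h]

-- Invariant: A's interleaved walk over a suffix s equals B's two-pass computation on the
-- de-interleaved s (every error path of either side yields the identical sentinel).
lemma pvLoop_eq (fl : Nat) (n : Nat) : ∀ (s : List Char), s.length ≤ n → ∀ (m b w : Int),
    pvLoopA fl s m b w =
      if (pvAltOdd s).all (fun c => c == ' ') then
        pvFinish fl w s.length (pvLoopB (pvAltEven s) m b)
      else (some (((fl + 1) / 2 : Nat) : Int), none, none) := by
  induction n with
  | zero =>
    intro s hs m b w
    have : s = [] := List.length_eq_zero_iff.mp (Nat.le_zero.mp hs)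
    subst this
    simp [pvLoopA, pvAltOdd, pvAltEven, pvLoopB, pvFinish]
  | succ n ih =>
    intro s hs m b w
    match s with
    | [] => simp [pvLoopA, pvAltOdd, pvAltEven, pvLoopB, pvFinish]
    | [c] =>
      by_cases h0 : c = '0'
      · subst h0; simp [pvLoopA, pvSepA, pvAltOdd, pvAltEven, pvLoopB, pvFinish]
      · by_cases h1 : c = '1'
        · subst h1; simp [pvLoopA, pvSepA, pvAltOdd, pvAltEven, pvLoopB, pvFinish]
        · by_cases hq : c = '?'
          · subst hq; simp [pvLoopA, pvSepA, pvAltOdd, pvAltEven, pvLoopB, pvFinish]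
          · simp [pvLoopA, pvAltOdd, pvAltEven, pvLoopB, pvFinish, h0, h1, hq]
    | c :: s' :: rest =>
      have hrest : rest.length ≤ n := by simp at hs; omega
      have hw : ∀ m2 b2 : Int,
          pvSepA fl (s' :: rest) m2 b2 (w + 1) =
            if (pvAltOdd (c :: s' :: rest)).all (fun c => c == ' ') then
              pvFinish fl w (c :: s' :: rest).length (pvLoopB (pvAltEven rest) m2 b2)
            else (some (((fl + 1) / 2 : Nat) : Int), none, none) := by
        intro m2 b2
        by_cases hsep : s' = ' '
        · subst hsep
          simp only [pvSepA, pvAltOdd, List.all_cons, beq_self_eq_true, Bool.true_and,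
            ne_eq, not_true_eq_false, if_false]
          rw [ih rest hrest]
          by_cases hall : (pvAltOdd rest).all (fun c => c == ' ') = true
          · simp only [hall, if_true]
            exact pvFinish_congr _ _ _ _ _ _ (by simp [List.length_cons]; omega)
          · simp only [hall, if_false, Bool.false_eq_true]
        · simp [pvSepA, pvAltOdd, hsep]
      by_cases h0 : c = '0'
      · subst h0
        simp only [pvLoopA, Char.reduceEq, reduceIte]
        rw [hw]
        simp [pvAltEven, pvLoopB]
      · by_cases h1 : c = '1'
        · subst h1
          simp only [pvLoopA, Char.reduceEq, reduceIte]
          rw [hw]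
          simp [pvAltEven, pvLoopB]
        · by_cases hq : c = '?'
          · subst hq
            simp only [pvLoopA, Char.reduceEq, reduceIte]
            rw [hw]
            simp [pvAltEven, pvLoopB, h0, h1]
          · -- invalid bit char: A returns the sentinel at once; B's fold fails at its
            -- head, so both branches of B's separator test give the same sentinel
            simp [pvLoopA, pvAltEven, pvLoopB, pvFinish, h0, h1, hq]

theorem parse_match_spec : Claim_equal_parse_match := by
  intro fmt _
  unfold Spec_parse_match parse_match parse_match_alt
  cases h : pvHexTry fmt.toList with
  | some r => simp only [h]
  | none =>
    simp only [h]
    by_cases he : fmt.toList.length &&& 1 = 0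
    · simp only [he, if_true]
    · simp only [he, if_false]
      rw [pvLoop_eq fmt.toList.length fmt.toList.length fmt.toList (le_refl _) 0 0 0]
      by_cases hall : (pvAltOdd fmt.toList).all (fun c => c == ' ') = true
      · simp only [hall, if_true, not_true_eq_false, if_false, Bool.not_true,
          Bool.false_eq_true, reduceIte]
        cases pvLoopB (pvAltEven fmt.toList) 0 0 <;> simp [pvFinish]
      · simp only [hall, if_false, Bool.false_eq_true, not_false_eq_true, if_true]

-- ===== VERDICT (by name: the statement is the Claim_ definition above) =====
-- (verdict theorem is parse_match_spec above)
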